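-- pv_equiv track=rewrite | github.com/NthigaLee/nse-insights | kenya-stocks/backend/extract_financials_v2.py | _fix_doubled_token
-- ===== SOURCE A (Python) =====
-- def _fix_doubled_token(token: str) -> str:
--     """Fix PDF doubled-character artifact seen in some Safaricom PDFs.
--
--     e.g. '114433..0088' → '143.08', '((00..22%%))' → '(0.2%)'
--     Rule: if every character in the token is repeated in adjacent pairs, halve it.
--     Only applied to tokens that contain at least one digit.
--     """
--     if not any(c.isdigit() for c in token):
--         return token
--     if len(token) < 4 or len(token) % 2 != 0:
--         return token
--     if all(token[i] == token[i + 1] for i in range(0, len(token), 2)):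
--         return token[::2]
--     return token
-- ===== SOURCE B (Python) =====
-- def _fix_doubled_token(token: str) -> str:
--     """Fix PDF doubled-character artifact via run-length encoding.
--
--     A token is a doubled artifact iff every maximal run of equal characters
--     has even length; the fix halves each run.  (A run of odd length means
--     some character is not paired with its duplicate.)
--     """
--     if not any(c.isdigit() for c in token):
--         return token
--     if len(token) < 4:
--         return token
--     halved = []
--     i = 0
--     n = len(token)
--     while i < n:
--         j = i
--         while j < n and token[j] == token[i]:
--             j += 1
--         run = j - i
--         if run % 2:
--             return token
--         halved.append(token[i] * (run // 2))
--         i = j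
--     return ''.join(halved)
-- ===== Notes on version B (the rewrite author's own statement) =====
-- stated objective: alternative
-- what changed: B detects the doubled-character artifact by run-length decomposition: it scans maximal runs of equal characters, bails out on any odd-length run, and emits each run halved, instead of A's scan comparing token[i] with token[i+1] at even indices followed by token[::2]; an odd total length is subsumed since it forces an odd run.
import Mathlib
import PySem

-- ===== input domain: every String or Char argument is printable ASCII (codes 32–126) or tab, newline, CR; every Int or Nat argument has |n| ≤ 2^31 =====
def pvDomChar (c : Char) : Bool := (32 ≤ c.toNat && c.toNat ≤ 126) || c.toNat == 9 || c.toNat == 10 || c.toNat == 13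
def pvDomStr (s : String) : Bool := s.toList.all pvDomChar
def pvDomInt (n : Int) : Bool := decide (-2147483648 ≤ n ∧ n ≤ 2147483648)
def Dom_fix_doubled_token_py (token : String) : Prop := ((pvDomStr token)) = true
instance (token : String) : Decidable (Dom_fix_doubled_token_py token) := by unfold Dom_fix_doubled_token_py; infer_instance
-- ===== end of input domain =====

-- B replaces A's even-index pair scan by a run-length decomposition (halve each maximal run,
-- fail on an odd run); objective: alternative algorithm, same cost.

-- ===== PORT A =====
-- literal port of A: digit guard, length/parity guard, adjacent-pair scan over range(0, len, 2), then token[::2]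
def fix_doubled_token_py (token : String) : String :=
  let cs := token.toList
  if !(cs.any (fun c => PySem.Chars.isdigit c)) then token
  else if cs.length < 4 || cs.length % 2 != 0 then token
  else if (PySem.List.pyRange 0 cs.length 2).all
      (fun i => PySem.List.pyGet? cs i == PySem.List.pyGet? cs (i + 1)) then
    -- token[::2]; step ≠ 0 never raises, so getD [] is exact
    String.ofList ((PySem.List.slice? cs none none 2).getD [])
  else token

-- ===== PORT B =====
-- Source B's outer while loop over maximal runs: the inner `while token[j] == token[i]` is the
-- takeWhile/dropWhile split of the rest; `return token` on an odd run is `none`;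
-- halved.append(token[i] * (run // 2)) followed by ''.join is the appended replicate.
def pvRunLoop : List Char → Option (List Char)
  | [] => some []
  | c :: rest =>
      let same := rest.takeWhile (fun x => x == c)
      let rest' := rest.dropWhile (fun x => x == c)
      let run := same.length + 1
      if run % 2 = 1 then none
      else match pvRunLoop rest' with
        | none => none
        | some hs => some (List.replicate (run / 2) c ++ hs)
termination_by cs => cs.length
decreasing_by
  have := List.length_dropWhile_le (fun x => x == c) rest
  simp
  omega

-- literal port of Source B: digit guard, len < 4 guard, then the run-length loop
def fix_doubled_token_py_alt (token : String) : String :=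
  let cs := token.toList
  if !(cs.any (fun c => PySem.Chars.isdigit c)) then token
  else if cs.length < 4 then token
  else match pvRunLoop cs with
    | none => token
    | some hs => String.ofList hs

-- ===== PRECONDITION & SPEC =====
def Spec_fix_doubled_token_py (token : String) (out : String) : Prop := out = fix_doubled_token_py_alt token
instance (token : String) (out : String) : Decidable (Spec_fix_doubled_token_py token out) := by unfold Spec_fix_doubled_token_py; infer_instance

-- ===== CLAIM (what is proved, stated in full; the proofs are below) =====
def Claim_equal_fix_doubled_token_py : Prop := ∀ (token : String), Dom_fix_doubled_token_py token → Spec_fix_doubled_token_py token (fix_doubled_token_py token)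

-- ===== LEMMAS AND PROOFS =====

/-- Every-other-character, structurally. -/
def pvEveryOther : List Char → List Char
  | [] => []
  | [a] => [a]
  | a :: _ :: t => a :: pvEveryOther t

/-- Two-at-a-time induction on lists. -/
theorem pvTwoStep (P : List Char → Prop) (h0 : P []) (h1 : ∀ a, P [a])
    (h2 : ∀ a b t, P t → P (a :: b :: t)) : ∀ cs, P cs
  | [] => h0
  | [a] => h1 a
  | a :: b :: t => h2 a b t (pvTwoStep P h0 h1 h2 t)

theorem pvFilterMap_eo (cs : List Char) :
    List.filterMap (fun k => cs[2 * k]?) (List.range ((cs.length + 1) / 2)) = pvEveryOther cs := by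
  induction cs using pvTwoStep with
  | h0 => simp [pvEveryOther]
  | h1 a => simp [pvEveryOther, List.range_succ]
  | h2 a b t ih =>
    have hm : ((a :: b :: t).length + 1) / 2 = (t.length + 1) / 2 + 1 := by
      simp; omega
    rw [hm, List.range_succ_eq_map, List.filterMap_cons, List.filterMap_map]
    simp only [pvEveryOther]
    have : (fun k => (a :: b :: t)[2 * k]?) ∘ Nat.succ = fun k => t[2 * k]? := by
      funext k
      have h2k : 2 * Nat.succ k = (2 * k + 1) + 1 := by omega
      simp [h2k]
    simp only [this]
    simp [ih]

/-- token[::2] is pvEveryOther. -/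
theorem pvSlice2 (cs : List Char) :
    (PySem.List.slice? cs none none 2).getD [] = pvEveryOther cs := by
  rw [PySem.List.slice?]
  simp only [PySem.List.sliceIndices]
  norm_num
  rw [← pvFilterMap_eo cs]
  rw [show (if 0 < cs.length then (((cs.length : Int) + 2 - 1) / 2).toNat else 0)
      = (cs.length + 1) / 2 by split <;> omega]
  apply List.filterMap_congr
  intro k _
  rw [show (2 * (k:Int)).toNat = 2 * k by omega]

/-- A's pair scan, as a ∀ over natural indices. -/
theorem pvAllPairs (cs : List Char) :
    ((PySem.List.pyRange 0 cs.length 2).all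
      (fun i => PySem.List.pyGet? cs i == PySem.List.pyGet? cs (i + 1)) = true)
    ↔ ∀ k, 2 * k < cs.length → cs[2 * k]? = cs[2 * k + 1]? := by
  rw [PySem.List.pyRange_of_pos 0 cs.length (by norm_num), List.all_map, List.all_eq_true]
  have hcount : (if (0:Int) < (cs.length:Int) then (((cs.length:Int) - 0 + 2 - 1) / 2).toNat else 0)
      = (cs.length + 1) / 2 := by split <;> omega
  constructor
  · intro h k hk
    have := h k (by simp only [List.mem_range]; rw [hcount]; omega)
    simp only [Function.comp] at this
    rw [show (0 : Int) + 2 * (k : Int) = ((2 * k : Nat) : Int) by push_cast; ring,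
      show ((2 * k : Nat) : Int) + 1 = ((2 * k + 1 : Nat) : Int) by push_cast; ring,
      PySem.List.pyGet?_natCast, PySem.List.pyGet?_natCast, beq_iff_eq] at this
    exact this
  · intro h k hk
    simp only [Function.comp]
    have hk' : 2 * k < cs.length := by
      simp only [List.mem_range] at hk
      rw [hcount] at hk
      omega
    rw [show (0 : Int) + 2 * (k : Int) = ((2 * k : Nat) : Int) by push_cast; ring,
      show ((2 * k : Nat) : Int) + 1 = ((2 * k + 1 : Nat) : Int) by push_cast; ring,
      PySem.List.pyGet?_natCast, PySem.List.pyGet?_natCast, beq_iff_eq]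
    exact h k hk'

/-- Doubling-reconstruction ⟺ even length ∧ A's pair condition. -/
theorem pvRebuild (cs : List Char) :
    (pvEveryOther cs).flatMap (fun ch => [ch, ch]) = cs
    ↔ (cs.length % 2 = 0 ∧ ∀ k, 2 * k < cs.length → cs[2 * k]? = cs[2 * k + 1]?) := by
  induction cs using pvTwoStep with
  | h0 => simp [pvEveryOther]
  | h1 a => simp [pvEveryOther]
  | h2 a b t ih =>
    simp only [pvEveryOther, List.flatMap_cons, List.cons_append, List.nil_append]
    constructor
    · rintro h
      have hab : a = b ∧ (pvEveryOther t).flatMap (fun ch => [ch, ch]) = t := by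
        simpa using h
      obtain ⟨rfl, ht⟩ := hab
      obtain ⟨hev, hall⟩ := ih.mp ht
      refine ⟨by simp only [List.length_cons]; omega, ?_⟩
      intro k hk
      cases k with
      | zero => simp
      | succ k =>
        rw [show 2 * (k + 1) = (2 * k + 1) + 1 by omega]
        simp only [List.getElem?_cons_succ]
        exact hall k (by simp at hk; omega)
    · rintro ⟨hev, hall⟩
      have hab : a = b := by
        have := hall 0 (by simp)
        simpa using this
      have ht : (pvEveryOther t).flatMap (fun ch => [ch, ch]) = t := by
        apply ih.mpr
        refine ⟨by simp at hev; omega, ?_⟩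
        intro k hk
        have := hall (k + 1) (by simp; omega)
        rw [show 2 * (k + 1) = (2 * k + 1) + 1 by omega] at this
        simpa using this
      rw [hab, ht]

/-- takeWhile/dropWhile of xs ++ ys where all of xs passes and ys's head fails. -/
theorem pvSplit (p : Char → Bool) (xs ys : List Char)
    (hx : ∀ x ∈ xs, p x = true) (hy : ∀ y, ys.head? = some y → p y = false) :
    (xs ++ ys).takeWhile p = xs ∧ (xs ++ ys).dropWhile p = ys := by
  induction xs with
  | nil =>
    cases ys with
    | nil => simp
    | cons y t =>
      have := hy y (by simp)
      simp [this]
  | cons x xs ih =>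
    have hpx := hx x (by simp)
    have := ih (fun z hz => hx z (by simp [hz]))
    simp [hpx, this.1, this.2]

/-- doubling a replicate. -/
theorem pvFlatRepl (k : Nat) (c : Char) :
    (List.replicate k c).flatMap (fun ch => [ch, ch]) = List.replicate (2 * k) c := by
  induction k with
  | zero => simp
  | succ k ih =>
    rw [List.replicate_succ, List.flatMap_cons, ih,
      show 2 * (k + 1) = (2 * k) + 1 + 1 by omega,
      List.replicate_succ, List.replicate_succ]
    rfl

/-- takeWhile (· == c) is a replicate of c. -/
theorem pvTakeWhileRepl (c : Char) (xs : List Char) :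
    xs.takeWhile (fun x => x == c) = List.replicate (xs.takeWhile (fun x => x == c)).length c := by
  induction xs with
  | nil => simp
  | cons x t ih =>
    by_cases h : x = c
    · subst h
      simp only [List.takeWhile_cons, beq_self_eq_true, if_true, List.length_cons,
        List.replicate_succ]
      exact congrArg _ ih
    · have hxc : (x == c) = false := by simpa using h
      simp [hxc]

/-- the head of a dropWhile fails the predicate. -/
theorem pvDropHead (p : Char → Bool) (xs : List Char) (y : Char)
    (h : (xs.dropWhile p).head? = some y) : p y = false := by
  induction xs with
  | nil => simp at h
  | cons x t ih =>
    rw [List.dropWhile_cons] at h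
    by_cases hp : p x = true
    · rw [if_pos hp] at h; exact ih h
    · rw [if_neg hp] at h
      simp only [List.head?_cons, Option.some.injEq] at h
      subst h
      simpa using hp

/-- Soundness: a successful run loop means the result doubles back to the input. -/
theorem pvRunLoop_sound_aux : ∀ (n : Nat) (cs : List Char), cs.length ≤ n →
    ∀ hs, pvRunLoop cs = some hs → hs.flatMap (fun ch => [ch, ch]) = cs := by
  intro n
  induction n with
  | zero =>
    intro cs hcs hs h
    have hnil : cs = [] := by cases cs with | nil => rfl | cons a t => simp at hcs
    subst hnil
    rw [pvRunLoop] at h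
    cases h
    simp
  | succ n ih =>
    intro cs hcs hs h
    cases cs with
    | nil => rw [pvRunLoop] at h; cases h; simp
    | cons c rest =>
      rw [pvRunLoop] at h
      by_cases hodd : ((rest.takeWhile (fun x => x == c)).length + 1) % 2 = 1
      · simp [hodd] at h
      · cases hr : pvRunLoop (rest.dropWhile (fun x => x == c)) with
        | none => simp [hodd, hr] at h
        | some hs' =>
          simp only [hodd, if_false, hr, Option.some.injEq] at h
          subst h
          have hrest : rest.length ≤ n := by simp at hcs; omega
          have hflat := ih (rest.dropWhile (fun x => x == c))
            (le_trans (List.length_dropWhile_le _ _) hrest) hs' hr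
          rw [List.flatMap_append, pvFlatRepl, hflat]
          rw [show 2 * (((rest.takeWhile (fun x => x == c)).length + 1) / 2)
              = (rest.takeWhile (fun x => x == c)).length + 1 by omega]
          rw [List.replicate_succ, ← pvTakeWhileRepl]
          simp [List.takeWhile_append_dropWhile]

theorem pvRunLoop_sound (cs hs : List Char) (h : pvRunLoop cs = some hs) :
    hs.flatMap (fun ch => [ch, ch]) = cs :=
  pvRunLoop_sound_aux cs.length cs le_rfl hs h

/-- Completeness: the run loop recovers s from its doubling. -/
theorem pvRunLoop_complete_aux : ∀ (n : Nat) (s : List Char), s.length ≤ n →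
    pvRunLoop (s.flatMap (fun ch => [ch, ch])) = some s := by
  intro n
  induction n with
  | zero =>
    intro s hs
    have hnil : s = [] := by cases s with | nil => rfl | cons a t => simp at hs
    subst hnil
    rw [List.flatMap_nil, pvRunLoop]
  | succ n ih =>
    intro s hlen
    cases s with
    | nil => rw [List.flatMap_nil, pvRunLoop]
    | cons c s' =>
      have hs' : s'.length ≤ n := by simp at hlen; omega
      set k := (s'.takeWhile (fun x => x == c)).length with hk
      set t := s'.dropWhile (fun x => x == c) with ht
      have hsplit : s' = List.replicate k c ++ t := by
        conv_lhs => rw [← List.takeWhile_append_dropWhile (p := fun x => x == c) (l := s')]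
        rw [← ht, hk, ← pvTakeWhileRepl]
      have harg : (c :: s').flatMap (fun ch => [ch, ch])
          = c :: (List.replicate (2 * k + 1) c ++ t.flatMap (fun ch => [ch, ch])) := by
        rw [List.flatMap_cons]
        conv_lhs => rw [hsplit]
        rw [List.flatMap_append, pvFlatRepl]
        rw [show 2 * k + 1 = (2 * k) + 1 by rfl, List.replicate_succ]
        rfl
      have hy : ∀ y, (t.flatMap (fun ch => [ch, ch])).head? = some y → (y == c) = false := by
        intro y hyh
        cases htc : t with
        | nil => rw [htc] at hyh; simp at hyh
        | cons d t' =>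
          rw [htc, List.flatMap_cons] at hyh
          simp only [List.cons_append, List.head?_cons, Option.some.injEq] at hyh
          subst hyh
          exact pvDropHead (fun x => x == c) s' d (by rw [← ht, htc]; rfl)
      have hx : ∀ x ∈ List.replicate (2 * k + 1) c, (x == c) = true := by
        intro x hx
        rw [List.eq_of_mem_replicate hx]
        simp
      obtain ⟨htw, hdw⟩ := pvSplit (fun x => x == c) (List.replicate (2 * k + 1) c)
        (t.flatMap (fun ch => [ch, ch])) hx hy
      rw [harg, pvRunLoop, htw, hdw]
      have hrec := ih t (le_trans (ht ▸ List.length_dropWhile_le _ _) hs')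
      rw [hrec]
      simp only [List.length_replicate]
      rw [if_neg (by omega)]
      rw [show (2 * k + 1 + 1) / 2 = k + 1 by omega]
      rw [List.replicate_succ, List.cons_append, ← hsplit]

theorem pvRunLoop_complete (s : List Char) :
    pvRunLoop (s.flatMap (fun ch => [ch, ch])) = some s :=
  pvRunLoop_complete_aux s.length s le_rfl

/-- pvEveryOther undoes doubling. -/
theorem pvEO_double (s : List Char) :
    pvEveryOther (s.flatMap (fun ch => [ch, ch])) = s := by
  induction s with
  | nil => simp [pvEveryOther]
  | cons c t ih => simp only [List.flatMap_cons, List.cons_append, List.nil_append,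
      pvEveryOther, ih]

-- ===== VERDICT (by name: the statement is the Claim_ definition above) =====
theorem fix_doubled_token_py_spec : Claim_equal_fix_doubled_token_py := by
  intro token _
  unfold Spec_fix_doubled_token_py fix_doubled_token_py fix_doubled_token_py_alt
  set cs := token.toList with hcs
  by_cases hdig : (cs.any (fun c => PySem.Chars.isdigit c)) = true
  swap
  · simp [hdig]
  by_cases hlen : cs.length < 4
  · simp [hdig, hlen]
  simp only [hdig, Bool.not_true, hlen, if_false, Bool.false_eq_true, decide_false,
    Bool.false_or]
  by_cases hreb : (pvEveryOther cs).flatMap (fun ch => [ch, ch]) = cs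
  · obtain ⟨hev, hpairs⟩ := (pvRebuild cs).mp hreb
    have hall := (pvAllPairs cs).mpr hpairs
    have hrun : pvRunLoop cs = some (pvEveryOther cs) := by
      conv_lhs => rw [← hreb]
      exact pvRunLoop_complete _
    simp [hev, hall, hrun, pvSlice2]
  · have hrun : pvRunLoop cs = none := by
      cases h : pvRunLoop cs with
      | none => rfl
      | some hs =>
        have hd := pvRunLoop_sound cs hs h
        have heo : pvEveryOther cs = hs := by rw [← hd, pvEO_double]
        exact absurd (heo ▸ hd) hreb
    by_cases hev : cs.length % 2 = 0
    · have hall : ¬ ((PySem.List.pyRange 0 cs.length 2).all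
          (fun i => PySem.List.pyGet? cs i == PySem.List.pyGet? cs (i + 1)) = true) := by
        intro h
        exact hreb ((pvRebuild cs).mpr ⟨hev, (pvAllPairs cs).mp h⟩)
      simp [hev, hall, hrun]
    · simp [hev, hrun]
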